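-- pv_equiv track=rewrite | github.com/ckoons/BubbleSpacetimeTheory | play/toy_271_ac_dichotomy_verification.py | measure_unit_propagation_derivable
-- ===== SOURCE A (Python) =====
-- def measure_unit_propagation_derivable(clauses, n):
--     """Count how many variables unit propagation determines (I_derivable estimate)."""
--     assignment = {}
--     changed = True
--     while changed:
--         changed = False
--         for clause in clauses:
--             unset = []
--             satisfied = False
--             for lit in clause:
--                 var = abs(lit)
--                 if var in assignment:
--                     if (lit > 0 and assignment[var]) or (lit < 0 and not assignment[var]):
--                         satisfied = True
--                         break
--                 else:
--                     unset.append(lit)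
--             if satisfied:
--                 continue
--             if len(unset) == 1:
--                 lit = unset[0]
--                 var = abs(lit)
--                 assignment[var] = lit > 0
--                 changed = True
--     return len(assignment)
-- ===== SOURCE B (Python) =====
-- def measure_unit_propagation_derivable(clauses, n):
--     """Count variables fixed by unit propagation, by iteratively simplifying a residual formula."""
--     true_lits = set()
--     work = [list(c) for c in clauses]
--     while True:
--         progress = False
--         remaining = []
--         for clause in work:
--             if any(l in true_lits for l in clause):
--                 continue                     # satisfied: clause disappears for good
--             residual = [l for l in clause if -l not in true_lits]
--             if len(residual) == 1:
--                 true_lits.add(residual[0])   # unit: force the literal, clause is now satisfied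
--                 progress = True
--             elif residual:
--                 remaining.append(residual)   # keep only the shrunken clause
--             # empty residual: fully falsified clause, can never act again; drop it
--         work = remaining
--         if not progress:
--             return len(true_lits)
-- ===== Notes on version B (the rewrite author's own statement) =====
-- stated objective: alternative
-- what changed: B does unit propagation by formula simplification: it rewrites a residual formula each round, deleting falsified literals from clauses and discarding satisfied/empty clauses, so clauses shrink and disappear instead of being re-evaluated in full against a var->bool dict as in A.
-- outside the precondition, e.g. on measure_unit_propagation_derivable([[0], [0, 5]], 5): A returns 2, B returns 1
import Mathlib
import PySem

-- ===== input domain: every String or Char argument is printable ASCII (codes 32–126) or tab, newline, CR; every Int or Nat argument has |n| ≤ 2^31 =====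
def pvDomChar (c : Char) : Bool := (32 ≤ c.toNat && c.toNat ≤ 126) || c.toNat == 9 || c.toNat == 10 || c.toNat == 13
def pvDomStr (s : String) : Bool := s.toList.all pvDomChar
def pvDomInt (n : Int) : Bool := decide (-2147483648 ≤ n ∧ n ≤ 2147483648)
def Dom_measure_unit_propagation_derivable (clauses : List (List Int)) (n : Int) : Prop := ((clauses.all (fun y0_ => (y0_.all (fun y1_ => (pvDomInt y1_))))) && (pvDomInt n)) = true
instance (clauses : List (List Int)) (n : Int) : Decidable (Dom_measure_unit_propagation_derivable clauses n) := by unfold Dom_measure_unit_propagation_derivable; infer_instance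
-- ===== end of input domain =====

-- B propagates units by simplifying a residual formula (clauses shrink and disappear) instead of
-- re-evaluating every original clause against a var→bool dict each round (alternative decomposition).

-- ===== PORT A =====
-- inner 'for lit in clause' loop: returns (satisfied, unset); early break on a satisfied literal
def pvA_clause (asg : PySem.Dict Int Bool) : List Int → Bool × List Int
  | [] => (false, [])
  | lit :: rest =>
    match asg.get? |lit| with
    | some b =>
      if (decide (lit > 0) && b) || (decide (lit < 0) && !b) then (true, [])
      else pvA_clause asg rest
    | none =>
      let r := pvA_clause asg rest
      (r.1, lit :: r.2)

-- body of 'for clause in clauses' carrying (assignment, changed)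
def pvA_step (st : PySem.Dict Int Bool × Bool) (clause : List Int) : PySem.Dict Int Bool × Bool :=
  let r := pvA_clause st.1 clause
  if r.1 then st
  else
    match r.2 with
    | [lit] => (st.1.insert |lit| (decide (lit > 0)), true)
    | _ => st

-- 'while changed' loop; fuel = total number of literals + 1 always suffices, because every
-- pass with changed=True inserts at least one fresh key, and keys are absolute values of literals
def pvA_loop (clauses : List (List Int)) : Nat → PySem.Dict Int Bool → PySem.Dict Int Bool
  | 0, asg => asg
  | fuel + 1, asg =>
    let st := clauses.foldl pvA_step (asg, false)
    if st.2 then pvA_loop clauses fuel st.1 else st.1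

def measure_unit_propagation_derivable (clauses : List (List Int)) (n : Int) : Int :=
  ((pvA_loop clauses (clauses.flatten.length + 1) PySem.Dict.empty).size : Int)

-- ===== PORT B =====
-- one round over the residual formula: satisfied clauses are dropped, falsified literals are
-- deleted, unit residuals force their literal; returns (true_lits, remaining, progress)
def pvB_pass (s : PySem.Set Int) : List (List Int) → PySem.Set Int × List (List Int) × Bool
  | [] => (s, [], false)
  | clause :: rest =>
    if clause.any (fun l => PySem.Set.contains s l) then pvB_pass s rest
    else
      match clause.filter (fun l => !PySem.Set.contains s (-l)) with
      | [l] =>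
        let r := pvB_pass (PySem.Set.add s l) rest
        (r.1, r.2.1, true)
      | [] => pvB_pass s rest
      | res =>
        let r := pvB_pass s rest
        (r.1, res :: r.2.1, r.2.2)

-- 'while True' loop on the shrinking residual formula; same fuel bound as A's loop
def pvB_loop : Nat → PySem.Set Int → List (List Int) → PySem.Set Int
  | 0, s, _ => s
  | fuel + 1, s, work =>
    let r := pvB_pass s work
    if r.2.2 then pvB_loop fuel r.1 r.2.1 else r.1

def measure_unit_propagation_derivable_alt (clauses : List (List Int)) (n : Int) : Int :=
  ((pvB_loop (clauses.flatten.length + 1) PySem.Set.empty clauses).length : Int)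

-- ===== PRECONDITION & SPEC =====
-- Pre_ excludes clauses containing the literal 0: 0 is not a CNF literal (it has no sign), and on such
-- malformed input A's value (variable 0 silently assigned False, the literal 0 never satisfying a clause)
-- and B's (the forced literal 0 satisfying later clauses) are both accidental, equally defensible choices.
def Pre_measure_unit_propagation_derivable (clauses : List (List Int)) (n : Int) : Prop :=
  ∀ c ∈ clauses, ∀ l ∈ c, l ≠ 0
instance (clauses : List (List Int)) (n : Int) : Decidable (Pre_measure_unit_propagation_derivable clauses n) := by unfold Pre_measure_unit_propagation_derivable; infer_instance

def pvWitness_measure_unit_propagation_derivable : List (List Int) × Int := ([[1], [-1, 2], [-2, 3]], 3)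

def Spec_measure_unit_propagation_derivable (clauses : List (List Int)) (n : Int) (out : Int) : Prop := out = measure_unit_propagation_derivable_alt clauses n
instance (clauses : List (List Int)) (n : Int) (out : Int) : Decidable (Spec_measure_unit_propagation_derivable clauses n out) := by unfold Spec_measure_unit_propagation_derivable; infer_instance

-- ===== CLAIM (what is proved, stated in full; the proofs are below) =====
def Claim_equal_measure_unit_propagation_derivable : Prop := ∀ (clauses : List (List Int)) (n : Int), Dom_measure_unit_propagation_derivable clauses n → Pre_measure_unit_propagation_derivable clauses n → Spec_measure_unit_propagation_derivable clauses n (measure_unit_propagation_derivable clauses n)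

-- ===== LEMMAS AND PROOFS =====

-- the coupling invariant between A's assignment dict and B's true-literal set
def pvInv (asg : PySem.Dict Int Bool) (s : PySem.Set Int) : Prop :=
  s.Nodup ∧ (0 : Int) ∉ s ∧ asg.size = s.length ∧
  (∀ v : Int, 0 < v → ∀ b : Bool, (asg.get? v = some b ↔ (if b then v else -v) ∈ s)) ∧
  (∀ v : Int, v ≤ 0 → asg.get? v = none)

lemma pvInv_mem {asg : PySem.Dict Int Bool} {s : PySem.Set Int} (h : pvInv asg s)
    {l : Int} (hl : l ≠ 0) : asg.get? |l| = some (decide (0 < l)) ↔ l ∈ s := by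
  obtain ⟨_, _, _, hiff, _⟩ := h
  rcases lt_trichotomy l 0 with hneg | rfl | hpos
  · have := hiff (-l) (by omega) false
    simp only [Bool.false_eq_true, if_false, neg_neg] at this
    rw [abs_of_neg hneg, show decide (0 < l) = false by simp [not_lt.mpr (le_of_lt hneg)]]
    exact this
  · exact absurd rfl hl
  · have := hiff l hpos true
    simp only [if_true] at this
    rw [abs_of_pos hpos, show decide (0 < l) = true by simp [hpos]]
    exact this

lemma pvInv_none {asg : PySem.Dict Int Bool} {s : PySem.Set Int} (h : pvInv asg s)
    {l : Int} (hl : l ≠ 0) : asg.get? |l| = none ↔ (l ∉ s ∧ -l ∉ s) := by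
  constructor
  · intro hn
    refine ⟨fun hmem => ?_, fun hmem => ?_⟩
    · rw [← pvInv_mem h hl] at hmem; rw [hn] at hmem; simp at hmem
    · have := (pvInv_mem h (show -l ≠ 0 by omega)).mpr hmem
      rw [abs_neg, hn] at this; simp at this
  · rintro ⟨h1, h2⟩
    cases o : asg.get? |l| with
    | none => rfl
    | some b =>
      by_cases hb : b = decide (0 < l)
      · rw [hb] at o; exact absurd ((pvInv_mem h hl).mp o) h1
      · have hb' : b = decide (0 < -l) := by cases b <;> simp_all <;> omega
        have ho : asg.get? |(-l)| = some (decide (0 < -l)) := by rw [abs_neg, o, hb']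
        exact absurd ((pvInv_mem h (show -l ≠ 0 by omega)).mp ho) h2

-- under the invariant the set never contains a literal together with its negation
lemma pvInv_not_neg {asg : PySem.Dict Int Bool} {s : PySem.Set Int} (h : pvInv asg s)
    {l : Int} (hn : -l ∈ s) : l ∉ s := by
  intro hl
  by_cases h0 : l = 0
  · exact h.2.1 (by rw [h0] at hl; exact hl)
  · have h1 := (pvInv_mem h h0).mpr hl
    have h2 := (pvInv_mem h (show -l ≠ 0 by omega)).mpr hn
    rw [abs_neg, h1] at h2
    have h3 := Option.some.inj h2
    rw [decide_eq_decide] at h3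
    omega

-- clause simulation: A's early-break scan computes the satisfied test and the unassigned filter
lemma pvA_clause_sim {asg : PySem.Dict Int Bool} {s : PySem.Set Int} (h : pvInv asg s)
    (clause : List Int) (hz : ∀ l ∈ clause, l ≠ 0) :
    (pvA_clause asg clause).1 = clause.any (fun l => PySem.Set.contains s l) ∧
    (clause.any (fun l => PySem.Set.contains s l) = false →
      (pvA_clause asg clause).2 = clause.filter (fun l => !PySem.Set.contains s (-l))) := by
  induction clause with
  | nil => simp [pvA_clause]
  | cons lit rest ih =>
    have hlit : lit ≠ 0 := hz lit (by simp)
    have hrest := ih (fun l hl => hz l (List.mem_cons_of_mem _ hl))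
    cases o : asg.get? |lit| with
    | some b =>
      by_cases hb : b = decide (0 < lit)
      · have hmem : lit ∈ s := (pvInv_mem h hlit).mp (by rw [o, hb])
        have hcond : ((decide (lit > 0) && b) || (decide (lit < 0) && !b)) = true := by
          rcases lt_trichotomy lit 0 with hc | hc | hc
          · have : (0 < lit) = False := by simp; omega
            simp [hb, hc, this]
          · exact absurd hc hlit
          · simp [hb, hc]
        have hcs : PySem.Set.contains s lit = true := (PySem.Set.contains_iff s lit).mpr hmem
        refine ⟨?_, ?_⟩
        · simp [pvA_clause, o, hcond, hmem]
        · intro hfalse; rw [List.any_cons, hcs] at hfalse; simp at hfalse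
      · have hb' : b = decide (0 < -lit) := by
          have hd : b = decide (0 < lit) ∨ b = decide (0 < -lit) := by
            rcases lt_trichotomy lit 0 with hc | hc | hc
            · cases b
              · left; simp; omega
              · right; simp; omega
            · exact absurd hc hlit
            · cases b
              · right; simp; omega
              · left; simp; omega
          rcases hd with h' | h'
          · exact absurd h' hb
          · exact h'
        have hmem : -lit ∈ s := (pvInv_mem h (show -lit ≠ 0 by omega)).mp (by rw [abs_neg, o, hb'])
        have hnot : lit ∉ s := fun hc => by
          have := (pvInv_mem h hlit).mpr hc; rw [o] at this
          exact hb (Option.some.inj this)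
        have hcond : ((decide (lit > 0) && b) || (decide (lit < 0) && !b)) = false := by
          rcases lt_trichotomy lit 0 with hc | hc | hc
          · simp [hb', hc]; omega
          · exact absurd hc hlit
          · simp [hb', hc]; omega
        have hcs : PySem.Set.contains s lit = false := by
          rw [Bool.eq_false_iff]; intro hc; exact hnot ((PySem.Set.contains_iff s lit).mp hc)
        have hcn : PySem.Set.contains s (-lit) = true := (PySem.Set.contains_iff s (-lit)).mpr hmem
        refine ⟨?_, fun hfalse => ?_⟩
        · simp only [pvA_clause, o, hcond, Bool.false_eq_true, if_false, List.any_cons, hcs,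
            Bool.false_or]
          exact hrest.1
        · simp only [List.any_cons, hcs, Bool.false_or] at hfalse
          simp only [pvA_clause, o, hcond, Bool.false_eq_true, if_false, List.filter_cons, hcn,
            Bool.not_true]
          exact hrest.2 hfalse
    | none =>
      obtain ⟨hns, hnn⟩ := (pvInv_none h hlit).mp o
      have hcs : PySem.Set.contains s lit = false := by
        rw [Bool.eq_false_iff]; intro hc; exact hns ((PySem.Set.contains_iff s lit).mp hc)
      have hcn : PySem.Set.contains s (-lit) = false := by
        rw [Bool.eq_false_iff]; intro hc; exact hnn ((PySem.Set.contains_iff s (-lit)).mp hc)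
      refine ⟨?_, fun hfalse => ?_⟩
      · simp only [pvA_clause, o, List.any_cons]
        rw [hcs]
        simp only [Bool.false_or]
        exact hrest.1
      · simp only [List.any_cons, hcs, Bool.false_or] at hfalse
        simp only [pvA_clause, o, List.filter_cons, hcn, Bool.not_false, if_true]
        rw [hrest.2 hfalse]

-- inserting a fresh unit into A's dict and appending the literal to B's set preserves the invariant
lemma pvInv_insert {asg : PySem.Dict Int Bool} {s : PySem.Set Int} (h : pvInv asg s)
    {l : Int} (hl0 : l ≠ 0) (hls : l ∉ s) (hln : -l ∉ s) :
    pvInv (asg.insert |l| (decide (l > 0))) (s ++ [l]) := by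
  obtain ⟨hnd, h0, hsz, hiff, hneg⟩ := h
  have hget : asg.get? |l| = none := (pvInv_none ⟨hnd, h0, hsz, hiff, hneg⟩ hl0).mpr ⟨hls, hln⟩
  have hcont : asg.contains |l| = false := by
    rw [PySem.Dict.contains_eq_isSome_get?, hget]; rfl
  have habs : (0 : Int) < |l| := abs_pos.mpr hl0
  refine ⟨?_, ?_, ?_, ?_, ?_⟩
  · rw [List.nodup_append]
    refine ⟨hnd, List.nodup_singleton l, ?_⟩
    intro a ha b hb
    rw [List.mem_singleton] at hb
    exact fun hc => hls ((hb ▸ hc) ▸ ha)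
  · simp only [List.mem_append, List.mem_singleton]
    rintro (hc | hc)
    · exact h0 hc
    · exact hl0 hc.symm
  · rw [PySem.Dict.size_insert, hcont]
    simp [hsz]
  · intro v hv b
    rw [PySem.Dict.get?_insert]
    by_cases hveq : v = |l|
    · rw [if_pos hveq]
      by_cases hbb : b = decide (0 < l)
      · have hx : (if b then v else -v) = l := by
          rw [hveq, hbb]
          rcases lt_trichotomy l 0 with hc | hc | hc
          · rw [abs_of_neg hc]; simp [not_lt.mpr (le_of_lt hc)]
          · exact absurd hc hl0
          · rw [abs_of_pos hc]; simp [hc]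
        rw [hx]
        constructor
        · intro _; simp
        · intro _; rw [hbb]
      · have hbb' : b = decide (0 < -l) := by
          have hd : b = decide (0 < l) ∨ b = decide (0 < -l) := by
            rcases lt_trichotomy l 0 with hc | hc | hc
            · cases b
              · left; simp; omega
              · right; simp; omega
            · exact absurd hc hl0
            · cases b
              · right; simp; omega
              · left; simp; omega
          rcases hd with h' | h'
          · exact absurd h' hbb
          · exact h'
        have hx : (if b then v else -v) = -l := by
          rw [hveq, hbb']
          rcases lt_trichotomy l 0 with hc | hc | hc
          · rw [abs_of_neg hc]; simp only [decide_eq_true_eq]; omega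
          · exact absurd hc hl0
          · rw [abs_of_pos hc]; simp only [decide_eq_true_eq]; omega
        rw [hx]
        constructor
        · intro hcsome
          exact absurd (Option.some.inj hcsome).symm hbb
        · intro hcmem
          rcases List.mem_append.mp hcmem with hc | hc
          · exact absurd hc hln
          · simp at hc; omega
    · rw [if_neg hveq, hiff v hv b]
      have hx : (if b then v else -v) ≠ l := by
        intro hc
        apply hveq
        cases b
        · simp at hc
          rw [← hc] at hl0 ⊢
          rw [abs_of_neg (by omega)]
          omega
        · simp at hc
          rw [← hc] at hl0 ⊢
          rw [abs_of_pos (by omega)]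
      simp [List.mem_append, hx]
  · intro v hv
    rw [PySem.Dict.get?_insert, if_neg (by omega)]
    exact hneg v hv

-- r is c with some literals deleted, each deleted literal being falsified under s
inductive pvSub (s : PySem.Set Int) : List Int → List Int → Prop
  | nil : pvSub s [] []
  | keep {l : Int} {r c : List Int} : pvSub s r c → pvSub s (l :: r) (l :: c)
  | drop {l : Int} {r c : List Int} : (-l) ∈ s → pvSub s r c → pvSub s r (l :: c)

lemma pvSub_refl (s : PySem.Set Int) (c : List Int) : pvSub s c c := by
  induction c with
  | nil => exact pvSub.nil
  | cons l t ih => exact pvSub.keep ih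

lemma pvSub_mem {s : PySem.Set Int} {r c : List Int} (h : pvSub s r c) :
    ∀ l ∈ r, l ∈ c := by
  induction h with
  | nil => intro l hl; exact absurd hl (List.not_mem_nil)
  | keep _ ih =>
    intro x hx
    rcases List.mem_cons.mp hx with h' | h'
    · exact List.mem_cons.mpr (Or.inl h')
    · exact List.mem_cons.mpr (Or.inr (ih x h'))
  | drop _ _ ih => intro x hx; exact List.mem_cons.mpr (Or.inr (ih x hx))

lemma pvSub_mono {s s' : PySem.Set Int} (hss : ∀ x ∈ s, x ∈ s') {r c : List Int}
    (h : pvSub s r c) : pvSub s' r c := by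
  induction h with
  | nil => exact pvSub.nil
  | keep _ ih => exact pvSub.keep ih
  | drop hm _ ih => exact pvSub.drop (hss _ hm) ih

lemma pvSub_filter (s : PySem.Set Int) (r : List Int) :
    pvSub s (r.filter (fun l => !PySem.Set.contains s (-l))) r := by
  induction r with
  | nil => exact pvSub.nil
  | cons l t ih =>
    rw [List.filter_cons]
    cases hc : PySem.Set.contains s (-l) with
    | true =>
      simp only [Bool.not_true, Bool.false_eq_true, if_false]
      exact pvSub.drop ((PySem.Set.contains_iff s (-l)).mp hc) ih
    | false =>
      simp only [Bool.not_false, if_true]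
      exact pvSub.keep ih

lemma pvSub_trans {s : PySem.Set Int} {r c : List Int} (h : pvSub s r c) :
    ∀ {q : List Int}, pvSub s q r → pvSub s q c := by
  induction h with
  | nil => intro q hq; exact hq
  | keep _ ih =>
    intro q hq
    cases hq with
    | keep hq' => exact pvSub.keep (ih hq')
    | drop hm hq' => exact pvSub.drop hm (ih hq')
  | drop hm _ ih => intro q hq; exact pvSub.drop hm (ih hq)

-- a literal deleted going from the clause to its residual is falsified
lemma pvSub_removed {s : PySem.Set Int} {r c : List Int} (hsub : pvSub s r c) :
    ∀ l ∈ c, l ∉ r → -l ∈ s := by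
  induction hsub with
  | nil => intro l hl; exact absurd hl (List.not_mem_nil)
  | @keep x r' c' _ ih =>
    intro l hl hnr
    rcases List.mem_cons.mp hl with h' | h'
    · exact absurd (h' ▸ List.mem_cons_self) hnr
    · exact ih l h' (fun hc => hnr (List.mem_cons_of_mem _ hc))
  | @drop x r' c' hm _ ih =>
    intro l hl hnr
    rcases List.mem_cons.mp hl with h' | h'
    · exact h' ▸ hm
    · exact ih l h' hnr

-- the satisfied test agrees on the clause and on its residual
lemma pvSub_any {asg : PySem.Dict Int Bool} {s : PySem.Set Int} (h : pvInv asg s)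
    {r c : List Int} (hsub : pvSub s r c) :
    c.any (fun l => PySem.Set.contains s l) = r.any (fun l => PySem.Set.contains s l) := by
  induction hsub with
  | nil => rfl
  | keep _ ih => rw [List.any_cons, List.any_cons, ih]
  | @drop l r' c' hm _ ih =>
    have hcs : PySem.Set.contains s l = false := by
      rw [Bool.eq_false_iff]
      intro hc
      exact pvInv_not_neg h hm ((PySem.Set.contains_iff s l).mp hc)
    rw [List.any_cons, hcs, Bool.false_or, ih]

-- the unassigned-literal filter agrees on the clause and on its residual
lemma pvSub_filter_eq {s : PySem.Set Int} {r c : List Int} (hsub : pvSub s r c) :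
    c.filter (fun l => !PySem.Set.contains s (-l)) = r.filter (fun l => !PySem.Set.contains s (-l)) := by
  induction hsub with
  | nil => rfl
  | keep _ ih => rw [List.filter_cons, List.filter_cons, ih]
  | @drop l r' c' hm _ ih =>
    have hcs : PySem.Set.contains s (-l) = true := (PySem.Set.contains_iff s (-l)).mpr hm
    rw [List.filter_cons, hcs]
    simpa using ih

-- a clause B has discarded: satisfied, or every literal falsified; A can never act on it again
def pvDead (s : PySem.Set Int) (c : List Int) : Prop :=
  (∃ l ∈ c, l ∈ s) ∨ (∀ l ∈ c, -l ∈ s)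

lemma pvDead_mono {s s' : PySem.Set Int} (hss : ∀ x ∈ s, x ∈ s') {c : List Int}
    (h : pvDead s c) : pvDead s' c := by
  rcases h with ⟨l, hl, hm⟩ | hall
  · exact Or.inl ⟨l, hl, hss l hm⟩
  · exact Or.inr (fun l hl => hss _ (hall l hl))

lemma pvDead_noop {asg : PySem.Dict Int Bool} {s : PySem.Set Int} (h : pvInv asg s)
    {c : List Int} (hd : pvDead s c) (hz : ∀ l ∈ c, l ≠ 0) (ch : Bool) :
    pvA_step (asg, ch) c = (asg, ch) := by
  have hcs := pvA_clause_sim h c hz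
  rcases hd with ⟨l, hl, hm⟩ | hall
  · have hany : c.any (fun l => PySem.Set.contains s l) = true :=
      List.any_eq_true.mpr ⟨l, hl, (PySem.Set.contains_iff s l).mpr hm⟩
    have h1 : (pvA_clause asg c).1 = true := by rw [hcs.1, hany]
    simp [pvA_step, h1]
  · have hany : c.any (fun l => PySem.Set.contains s l) = false := by
      rw [List.any_eq_false]
      intro l hl hc
      exact pvInv_not_neg h (hall l hl) ((PySem.Set.contains_iff s l).mp hc)
    have h1 : (pvA_clause asg c).1 = false := by rw [hcs.1, hany]
    have h2 : (pvA_clause asg c).2 = [] := by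
      rw [hcs.2 hany, List.filter_eq_nil_iff]
      intro l hl
      rw [Bool.not_eq_true, Bool.not_eq_eq_eq_not, Bool.not_false]
      exact (PySem.Set.contains_iff s (-l)).mpr (hall l hl)
    simp [pvA_step, h1, h2]

-- B's residual work list is the original formula with dead clauses removed and
-- residuals of the surviving clauses kept, all justified by the current set
inductive pvRel (s : PySem.Set Int) : List (List Int) → List (List Int) → Prop
  | nil : pvRel s [] []
  | dead {c : List Int} {cs R : List (List Int)} : pvDead s c → pvRel s cs R → pvRel s (c :: cs) R
  | keep {c r : List Int} {cs R : List (List Int)} : pvSub s r c → pvRel s cs R → pvRel s (c :: cs) (r :: R)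

lemma pvRel_mono {s s' : PySem.Set Int} (hss : ∀ x ∈ s, x ∈ s') {cs R : List (List Int)}
    (h : pvRel s cs R) : pvRel s' cs R := by
  induction h with
  | nil => exact pvRel.nil
  | dead hd _ ih => exact pvRel.dead (pvDead_mono hss hd) ih
  | keep hsub _ ih => exact pvRel.keep (pvSub_mono hss hsub) ih

lemma pvRel_refl (s : PySem.Set Int) (cs : List (List Int)) : pvRel s cs cs := by
  induction cs with
  | nil => exact pvRel.nil
  | cons c t ih => exact pvRel.keep (pvSub_refl s c) ih

-- one round: A's fold over the original clauses is simulated by B's pass over the residual list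
lemma pvPass_sim :
    ∀ (cs : List (List Int)), (∀ c ∈ cs, ∀ l ∈ c, l ≠ 0) →
    ∀ (R : List (List Int)) (asg : PySem.Dict Int Bool) (s : PySem.Set Int) (ch : Bool),
    pvInv asg s → pvRel s cs R →
    pvInv (cs.foldl pvA_step (asg, ch)).1 (pvB_pass s R).1 ∧
    pvRel (pvB_pass s R).1 cs (pvB_pass s R).2.1 ∧
    (∀ x ∈ s, x ∈ (pvB_pass s R).1) ∧
    (cs.foldl pvA_step (asg, ch)).2 = (ch || (pvB_pass s R).2.2) := by
  intro cs
  induction cs with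
  | nil =>
    intro _ R asg s ch hInv hrel
    cases hrel
    exact ⟨hInv, pvRel.nil, fun x hx => hx, by simp [pvB_pass]⟩
  | cons c cs ih =>
    intro hz R asg s ch hInv hrel
    have hzc : ∀ l ∈ c, l ≠ 0 := hz c (by simp)
    have hz' : ∀ c' ∈ cs, ∀ l ∈ c', l ≠ 0 := fun c' hc' => hz c' (List.mem_cons_of_mem _ hc')
    cases hrel with
    | dead hd hrest =>
      rw [List.foldl_cons, pvDead_noop hInv hd hzc ch]
      obtain ⟨hI, hR, hS, hF⟩ := ih hz' _ asg s ch hInv hrest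
      exact ⟨hI, pvRel.dead (pvDead_mono hS hd) hR, hS, hF⟩
    | @keep _ r _ R₂ hsub hrest =>
      have hcs := pvA_clause_sim hInv c hzc
      have hanyeq := pvSub_any hInv hsub
      cases hany : r.any (fun l => PySem.Set.contains s l) with
      | true =>
        -- clause satisfied: A skips it, B drops it
        have h1 : (pvA_clause asg c).1 = true := by rw [hcs.1, hanyeq, hany]
        have hAstep : pvA_step (asg, ch) c = (asg, ch) := by simp [pvA_step, h1]
        have hB : pvB_pass s (r :: R₂) = pvB_pass s R₂ := by
          simp only [pvB_pass, hany, if_true]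
        rw [List.foldl_cons, hAstep, hB]
        obtain ⟨hI, hR, hS, hF⟩ := ih hz' R₂ asg s ch hInv hrest
        obtain ⟨l, hl, hm⟩ := List.any_eq_true.mp hany
        have hmS : PySem.Set.contains s l = true := hm
        refine ⟨hI, pvRel.dead (Or.inl ⟨l, pvSub_mem hsub l hl, hS l ((PySem.Set.contains_iff s l).mp hmS)⟩) hR, hS, hF⟩
      | false =>
        have hanyc : c.any (fun l => PySem.Set.contains s l) = false := by rw [hanyeq, hany]
        have h1 : (pvA_clause asg c).1 = false := by rw [hcs.1, hanyc]
        have hunset : (pvA_clause asg c).2 = r.filter (fun l => !PySem.Set.contains s (-l)) := by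
          rw [hcs.2 hanyc, pvSub_filter_eq hsub]
        cases hres : r.filter (fun l => !PySem.Set.contains s (-l)) with
        | nil =>
          -- every literal assigned, none satisfied: A no-op, B drops the clause as falsified
          have hAstep : pvA_step (asg, ch) c = (asg, ch) := by
            simp only [pvA_step, h1, Bool.false_eq_true, if_false, hunset, hres]
          have hB : pvB_pass s (r :: R₂) = pvB_pass s R₂ := by
            simp only [pvB_pass, hany, Bool.false_eq_true, if_false, hres]
          rw [List.foldl_cons, hAstep, hB]
          obtain ⟨hI, hR, hS, hF⟩ := ih hz' R₂ asg s ch hInv hrest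
          have hallc : ∀ l ∈ c, -l ∈ s := by
            intro l hl
            by_cases hmr : l ∈ r
            · have := List.filter_eq_nil_iff.mp hres l hmr
              rw [Bool.not_eq_true, Bool.not_eq_eq_eq_not, Bool.not_false] at this
              exact (PySem.Set.contains_iff s (-l)).mp this
            · exact pvSub_removed hsub l hl hmr
          exact ⟨hI, pvRel.dead (pvDead_mono hS (Or.inr hallc)) hR, hS, hF⟩
        | cons x tail =>
          cases tail with
          | nil =>
            -- unit residual: A inserts |x| ↦ (x > 0), B forces x and drops the clause
            have hAstep : pvA_step (asg, ch) c = (asg.insert |x| (decide (x > 0)), true) := by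
              simp only [pvA_step, h1, Bool.false_eq_true, if_false, hunset, hres]
            have hxr : x ∈ r := List.mem_of_mem_filter (hres ▸ List.mem_cons_self)
            have hx0 : x ≠ 0 := hzc x (pvSub_mem hsub x hxr)
            have hxs : x ∉ s := by
              intro hc
              have := List.any_eq_false.mp hany x hxr
              exact this ((PySem.Set.contains_iff s x).mpr hc)
            have hxn : -x ∉ s := by
              intro hc
              have h2 := List.of_mem_filter (p := fun l => !PySem.Set.contains s (-l))
                (hres ▸ List.mem_cons_self)
              simp at h2
              exact h2 hc
            have hadd : PySem.Set.add s x = s ++ [x] := PySem.Set.add_of_not_mem hxs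
            have hB : pvB_pass s (r :: R₂) =
                ((pvB_pass (PySem.Set.add s x) R₂).1, (pvB_pass (PySem.Set.add s x) R₂).2.1, true) := by
              simp only [pvB_pass, hany, Bool.false_eq_true, if_false, hres]
            have hInv' : pvInv (asg.insert |x| (decide (x > 0))) (s ++ [x]) :=
              pvInv_insert hInv hx0 hxs hxn
            have hrest' : pvRel (s ++ [x]) cs R₂ :=
              pvRel_mono (fun y hy => List.mem_append.mpr (Or.inl hy)) hrest
            rw [List.foldl_cons, hAstep, hB]
            rw [← hadd] at hInv' hrest'
            obtain ⟨hI, hR, hS, hF⟩ := ih hz' R₂ _ _ true hInv' hrest'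
            have hsS : ∀ y ∈ s, y ∈ (pvB_pass (PySem.Set.add s x) R₂).1 := by
              intro y hy
              exact hS y (by rw [hadd]; exact List.mem_append.mpr (Or.inl hy))
            have hxin : x ∈ (pvB_pass (PySem.Set.add s x) R₂).1 :=
              hS x (by rw [hadd]; exact List.mem_append.mpr (Or.inr (by simp)))
            refine ⟨hI, pvRel.dead (Or.inl ⟨x, pvSub_mem hsub x hxr, hxin⟩) hR, hsS, ?_⟩
            rw [hF]
            simp
          | cons y t2 =>
            -- two or more unassigned literals: A no-op, B keeps the shrunken clause
            have hAstep : pvA_step (asg, ch) c = (asg, ch) := by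
              simp only [pvA_step, h1, Bool.false_eq_true, if_false, hunset, hres]
            have hB : pvB_pass s (r :: R₂) =
                ((pvB_pass s R₂).1, (x :: y :: t2) :: (pvB_pass s R₂).2.1, (pvB_pass s R₂).2.2) := by
              simp only [pvB_pass, hany, Bool.false_eq_true, if_false, hres]
            rw [List.foldl_cons, hAstep, hB]
            obtain ⟨hI, hR, hS, hF⟩ := ih hz' R₂ asg s ch hInv hrest
            have hsubres : pvSub s (x :: y :: t2) c := by
              rw [← hres]
              exact pvSub_trans hsub (pvSub_filter s r)
            exact ⟨hI, pvRel.keep (pvSub_mono hS hsubres) hR, hS, hF⟩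

-- the two loops, run with the same fuel, end with equal sizes
lemma pvLoop_sim (cs : List (List Int)) (hz : ∀ c ∈ cs, ∀ l ∈ c, l ≠ 0) :
    ∀ (fuel : Nat) (asg : PySem.Dict Int Bool) (s : PySem.Set Int) (R : List (List Int)),
    pvInv asg s → pvRel s cs R →
    (pvA_loop cs fuel asg).size = (pvB_loop fuel s R).length := by
  intro fuel
  induction fuel with
  | zero =>
    intro asg s R h _
    simpa [pvA_loop, pvB_loop] using h.2.2.1
  | succ fuel ih =>
    intro asg s R hInv hrel
    obtain ⟨hI, hR, _, hF⟩ := pvPass_sim cs hz R asg s false hInv hrel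
    simp only [pvA_loop, pvB_loop]
    rw [hF, Bool.false_or]
    cases hflag : (pvB_pass s R).2.2 with
    | true => exact ih _ _ _ hI hR
    | false =>
      simp only [Bool.false_eq_true, if_false]
      exact hI.2.2.1

-- ===== VERDICT (by name: the statement is the Claim_ definition above) =====
theorem measure_unit_propagation_derivable_spec : Claim_equal_measure_unit_propagation_derivable := by
  intro clauses n _ hpre
  show _ = _
  unfold measure_unit_propagation_derivable measure_unit_propagation_derivable_alt
  have h0 : pvInv PySem.Dict.empty PySem.Set.empty := by
    refine ⟨List.nodup_nil, by simp [PySem.Set.empty], by simp [PySem.Dict.size_empty, PySem.Set.empty], ?_, ?_⟩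
    · intro v _ b; simp [PySem.Dict.get?_empty, PySem.Set.empty]
    · intro v _; simp [PySem.Dict.get?_empty]
  rw [pvLoop_sim clauses hpre _ _ _ _ h0 (pvRel_refl _ _)]
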